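-- pv_equiv track=rewrite | github.com/scientiz/Calculus-I-Buddy | Calculus_Buddy.py | _replace_const_token
-- ===== SOURCE A (Python) =====
-- def _is_alnum_or_underscore(ch):
--     # TI-safe replacement for str.isalnum()
--     if ch == "_":
--         return True
--     o = ord(ch)
--     # 0-9
--     if 48 <= o <= 57:
--         return True
--     # A-Z
--     if 65 <= o <= 90:
--         return True
--     # a-z
--     if 97 <= o <= 122:
--         return True
--     return False
--
-- def _replace_const_token(s, token, repl):
--     """
--     Replace constants like pi, e only when token is not part of a larger word.
--     Example: replace 'pi' in '2*pi' but not in 'pilot'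
--     TI-safe: does not use isalnum().
--     """
--     out = ""
--     i = 0
--     n = len(s)
--     tlen = len(token)
--
--     while i < n:
--         if s[i:i + tlen] == token:
--             left_ok = (i == 0) or (not _is_alnum_or_underscore(s[i - 1]))
--             right_ok = (i + tlen == n) or (not _is_alnum_or_underscore(s[i + tlen]))
--             if left_ok and right_ok:
--                 out += repl
--                 i += tlen
--                 continue
--         out += s[i]
--         i += 1
--
--     return out
-- ===== SOURCE B (Python) =====
-- def _is_word_char(ch):
--     return ch == "_" or ch.isalnum()
--
-- def _replace_const_token(s, token, repl):
--     # Jump between occurrences with str.find instead of scanning char by char.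
--     parts = []
--     prev = 0
--     i = 0
--     n = len(s)
--     tlen = len(token)
--     while True:
--         p = s.find(token, i)
--         if p == -1:
--             parts.append(s[prev:])
--             break
--         left_ok = (p == 0) or (not _is_word_char(s[p - 1]))
--         right_ok = (p + tlen == n) or (not _is_word_char(s[p + tlen]))
--         if left_ok and right_ok:
--             parts.append(s[prev:p])
--             parts.append(repl)
--             prev = i = p + tlen
--         else:
--             i = p + 1
--     return "".join(parts)
-- ===== Notes on version B (the rewrite author's own statement) =====
-- stated objective: faster
-- what changed: B replaces A's char-by-char while-loop (slice comparison at every index, output grown one char at a time by string concatenation) with a find-and-slice loop: str.find jumps directly to the next candidate occurrence, whole unmatched segments are appended as slices to a parts list, and the pieces are joined once at the end.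
-- outside the precondition, e.g. on _replace_const_token('', '', 'X'): A returns '', B does not finish within the time limit; on _replace_const_token('ab', '', 'X'): A returns 'ab', B returns 'ab'
import Mathlib
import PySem

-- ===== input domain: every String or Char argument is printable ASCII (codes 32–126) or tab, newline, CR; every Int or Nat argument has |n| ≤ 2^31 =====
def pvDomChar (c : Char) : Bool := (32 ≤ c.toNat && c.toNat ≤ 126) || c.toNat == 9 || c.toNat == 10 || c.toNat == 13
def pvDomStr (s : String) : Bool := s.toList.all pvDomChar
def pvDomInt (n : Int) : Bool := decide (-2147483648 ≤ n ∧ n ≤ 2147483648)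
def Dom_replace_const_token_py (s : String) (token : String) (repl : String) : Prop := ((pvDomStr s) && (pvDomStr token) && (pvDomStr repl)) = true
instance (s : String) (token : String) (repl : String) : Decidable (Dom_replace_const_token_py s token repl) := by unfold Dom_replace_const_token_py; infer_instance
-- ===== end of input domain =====

-- B replaces A's char-by-char while-loop (output grown by repeated string concatenation) with a
-- find-and-slice loop: str.find jumps to the next candidate, segments are appended as slices and
-- joined once; measured much faster on large inputs.

-- ===== PORT A =====
-- _is_alnum_or_underscore, the if-chain of A
def pvIsAlnumA (ch : Char) : Bool :=
  if ch == '_' then true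
  else if 48 ≤ ch.toNat ∧ ch.toNat ≤ 57 then true
  else if 65 ≤ ch.toNat ∧ ch.toNat ≤ 90 then true
  else if 97 ≤ ch.toNat ∧ ch.toNat ≤ 122 then true
  else false

-- the while loop of A; fuel s.length+1 bounds the ≤ s.length iterations the loop makes for a
-- non-empty token; for an empty token Python may diverge (those inputs are excluded by Pre_)
def pvLoopA (s t r : List Char) (fuel i : Nat) (out : List Char) : List Char :=
  match fuel with
  | 0 => out
  | fuel + 1 =>
    if i < s.length then
      -- s[i:i+tlen] == token  (indices nonnegative, Python slice clamps; take clamps the same way)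
      if (s.drop i).take t.length = t then
        -- left_ok / right_ok: getD is exact, the index is in range whenever the first disjunct is false
        if (i == 0 || !pvIsAlnumA (s.getD (i - 1) ' ')) &&
           (i + t.length == s.length || !pvIsAlnumA (s.getD (i + t.length) ' ')) then
          pvLoopA s t r fuel (i + t.length) (out ++ r)
        else
          pvLoopA s t r fuel (i + 1) (out ++ [s.getD i ' '])
      else
        pvLoopA s t r fuel (i + 1) (out ++ [s.getD i ' '])
    else out

def replace_const_token_py (s : String) (token : String) (repl : String) : String :=
  String.mk (pvLoopA s.toList token.toList repl.toList (s.toList.length + 1) 0 [])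

-- ===== PORT B =====
-- _is_word_char: ch == "_" or ch.isalnum(); on the ASCII domain isalnum() is exactly these ranges
def pvIsWordB (ch : Char) : Bool :=
  ch == '_' || ((48 ≤ ch.toNat && ch.toNat ≤ 57) || (65 ≤ ch.toNat && ch.toNat ≤ 90) ||
                (97 ≤ ch.toNat && ch.toNat ≤ 122))

-- the while True loop of B: find the next candidate, append slices; parts are joined by ++
-- (fuel s.length+2 bounds the iterations for a non-empty token; empty token excluded by Pre_)
def pvLoopB (s t r : List Char) (fuel i prev : Nat) (parts : List Char) : List Char :=
  match fuel with
  | 0 => parts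
  | fuel + 1 =>
    let p := PySem.Chars.findFrom s t (i : Int)   -- s.find(token, i)
    if p = -1 then parts ++ s.drop prev           -- parts.append(s[prev:]); break
    else
      let pn := p.toNat
      if (pn == 0 || !pvIsWordB (s.getD (pn - 1) ' ')) &&
         (pn + t.length == s.length || !pvIsWordB (s.getD (pn + t.length) ' ')) then
        pvLoopB s t r fuel (pn + t.length) (pn + t.length)
          (parts ++ (s.drop prev).take (pn - prev) ++ r)   -- s[prev:p], repl
      else
        pvLoopB s t r fuel (pn + 1) prev parts

def replace_const_token_py_alt (s : String) (token : String) (repl : String) : String :=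
  String.mk (pvLoopB s.toList token.toList repl.toList (s.toList.length + 2) 0 0 [])

-- ===== PRECONDITION & SPEC =====
-- Pre_ excludes the empty token: there neither loop can advance past a matching position, so A
-- diverges on every string with a position passing the boundary test (and B on a slightly larger
-- set, e.g. the empty string); on strings of word characters only, both return the string unchanged.
def Pre_replace_const_token_py (s : String) (token : String) (repl : String) : Prop :=
  token ≠ ""
instance (s : String) (token : String) (repl : String) : Decidable (Pre_replace_const_token_py s token repl) := by unfold Pre_replace_const_token_py; infer_instance

def pvWitness_replace_const_token_py : String × String × String := ("2*pi+pilot", "pi", "3.14")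

def Spec_replace_const_token_py (s : String) (token : String) (repl : String) (out : String) : Prop := out = replace_const_token_py_alt s token repl
instance (s : String) (token : String) (repl : String) (out : String) : Decidable (Spec_replace_const_token_py s token repl out) := by unfold Spec_replace_const_token_py; infer_instance

-- ===== CLAIM (what is proved, stated in full; the proofs are below) =====
def Claim_equal_replace_const_token_py : Prop := ∀ (s : String) (token : String) (repl : String), Dom_replace_const_token_py s token repl → Pre_replace_const_token_py s token repl → Spec_replace_const_token_py s token repl (replace_const_token_py s token repl)

-- ===== LEMMAS AND PROOFS =====

-- the two word-character tests agree on every Char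
lemma pvIsAlnumA_eq_pvIsWordB (c : Char) : pvIsAlnumA c = pvIsWordB c := by
  unfold pvIsAlnumA pvIsWordB
  split_ifs <;> simp_all

-- A's slice test is the prefix relation
lemma pvMatch_iff (L T : List Char) (i : Nat) :
    (L.drop i).take T.length = T ↔ T <+: L.drop i := by
  rw [List.prefix_iff_eq_take, eq_comm]

-- a prefix match at q ≥ i is an infix of L.drop i
lemma pvPrefix_infix (L T : List Char) (i q : Nat) (hiq : i ≤ q) (h : T <+: L.drop q) :
    T <:+: L.drop i := by
  refine List.infix_iff_prefix_suffix.mpr ⟨L.drop q, h, ?_⟩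
  have : L.drop q = (L.drop i).drop (q - i) := by
    rw [List.drop_drop]; congr 1; omega
  rw [this]; exact List.drop_suffix _ _

-- fuel irrelevance for A's loop (non-empty token): any fuel above the remaining length agrees
lemma pvLoopA_fuel (L T R : List Char) (hT : T ≠ []) :
    ∀ k i out f1 f2, L.length - i ≤ k → L.length - i < f1 → L.length - i < f2 →
      pvLoopA L T R f1 i out = pvLoopA L T R f2 i out := by
  intro k
  induction k with
  | zero =>
    intro i out f1 f2 hk h1 h2
    obtain ⟨f1', rfl⟩ : ∃ f1', f1 = f1' + 1 := ⟨f1 - 1, by omega⟩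
    obtain ⟨f2', rfl⟩ : ∃ f2', f2 = f2' + 1 := ⟨f2 - 1, by omega⟩
    have hi : ¬ i < L.length := by omega
    simp [pvLoopA, hi]
  | succ k ih =>
    intro i out f1 f2 hk h1 h2
    obtain ⟨f1', rfl⟩ : ∃ f1', f1 = f1' + 1 := ⟨f1 - 1, by omega⟩
    obtain ⟨f2', rfl⟩ : ∃ f2', f2 = f2' + 1 := ⟨f2 - 1, by omega⟩
    by_cases hi : i < L.length
    · have hT1 : 1 ≤ T.length := by
        cases T with
        | nil => exact absurd rfl hT
        | cons a l => simp
      simp only [pvLoopA, if_pos hi]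
      split
      · split
        · exact ih (i + T.length) (out ++ R) f1' f2' (by omega) (by omega) (by omega)
        · exact ih (i + 1) (out ++ [L.getD i ' ']) f1' f2' (by omega) (by omega) (by omega)
      · exact ih (i + 1) (out ++ [L.getD i ' ']) f1' f2' (by omega) (by omega) (by omega)
    · simp [pvLoopA, hi]

-- gluing slices: s[a:b] ++ s[b:c] = s[a:c]
lemma pvGlue (L : List Char) (a b c : Nat) (hab : a ≤ b) (hbc : b ≤ c) :
    (L.drop a).take (b - a) ++ (L.drop b).take (c - b) = (L.drop a).take (c - a) := by
  have h1 : c - a = (b - a) + (c - b) := by omega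
  rw [h1, List.take_add]
  congr 2
  rw [List.drop_drop]
  congr 1
  omega

-- A walks char by char through a region with no match, appending it unchanged
lemma pvLoopA_skip (L T R : List Char) (hT : T ≠ []) :
    ∀ k i p out, i ≤ p → p ≤ L.length → p - i ≤ k →
      (∀ q, i ≤ q → q < p → ¬ T <+: L.drop q) →
      ∀ f1 f2, L.length - i < f1 → L.length - p < f2 →
      pvLoopA L T R f1 i out = pvLoopA L T R f2 p (out ++ (L.drop i).take (p - i)) := by
  intro k
  induction k with
  | zero =>
    intro i p out hip hpn hk _ f1 f2 h1 h2
    have : i = p := by omega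
    subst this
    simp only [Nat.sub_self, List.take_zero, List.append_nil]
    exact pvLoopA_fuel L T R hT (L.length - i) i out f1 f2 le_rfl h1 h2
  | succ k ih =>
    intro i p out hip hpn hk hno f1 f2 h1 h2
    by_cases hieq : i = p
    · subst hieq
      simp only [Nat.sub_self, List.take_zero, List.append_nil]
      exact pvLoopA_fuel L T R hT (L.length - i) i out f1 f2 le_rfl h1 h2
    · have hilt : i < p := by omega
      have hiL : i < L.length := by omega
      obtain ⟨f1', rfl⟩ : ∃ f1', f1 = f1' + 1 := ⟨f1 - 1, by omega⟩
      have hnom : ¬ (L.drop i).take T.length = T := by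
        rw [pvMatch_iff]; exact hno i le_rfl hilt
      simp only [pvLoopA, if_pos hiL, if_neg hnom]
      rw [ih (i + 1) p (out ++ [L.getD i ' ']) (by omega) hpn (by omega)
            (fun q hq hq' => hno q (by omega) hq') f1' f2 (by omega) h2]
      congr 1
      rw [List.append_assoc]
      congr 1
      have hdrop : L.drop i = L[i] :: L.drop (i + 1) := List.drop_eq_getElem_cons hiL
      have htk : p - i = (p - (i + 1)) + 1 := by omega
      rw [hdrop, htk, List.getD_eq_getElem L ' ' hiL, List.take_succ_cons]
      simp

-- the bridge: A's state (out = parts ++ s[prev:i], index i) matches B's state (parts, prev, i)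
lemma pvBridge (L T R : List Char) (hT : T ≠ []) :
    ∀ k i prev parts, L.length - i ≤ k → prev ≤ i → i ≤ L.length →
      ∀ f1 f2, L.length - i < f1 → L.length - i < f2 →
      pvLoopA L T R f1 i (parts ++ (L.drop prev).take (i - prev)) =
      pvLoopB L T R f2 i prev parts := by
  intro k
  induction k with
  | zero =>
    intro i prev parts hk hpi hin f1 f2 h1 h2
    have hieq : i = L.length := by omega
    obtain ⟨f2', rfl⟩ : ∃ f2', f2 = f2' + 1 := ⟨f2 - 1, by omega⟩
    have hfind : PySem.Chars.findFrom L T (i : Int) = -1 := by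
      rw [PySem.Chars.findFrom_natCast_eq_neg_one_iff L T i hin]
      intro hinf
      have : T <+: L.drop i := by
        subst hieq; simp at hinf ⊢; simpa [hinf]
      subst hieq
      simp at this
      exact hT this
    simp only [pvLoopB, hfind, if_pos]
    obtain ⟨f1', rfl⟩ : ∃ f1', f1 = f1' + 1 := ⟨f1 - 1, by omega⟩
    have hi : ¬ i < L.length := by omega
    simp only [pvLoopA, hi, if_false]
    have : i - prev = L.length - prev := by omega
    rw [this]
    have hlen : (L.drop prev).take (L.length - prev) = L.drop prev := by
      apply List.take_of_length_le; simp
    rw [hlen]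
  | succ k ih =>
    intro i prev parts hk hpi hin f1 f2 h1 h2
    obtain ⟨f2', rfl⟩ : ∃ f2', f2 = f2' + 1 := ⟨f2 - 1, by omega⟩
    by_cases hfind : PySem.Chars.findFrom L T (i : Int) = -1
    · -- no further occurrence: A walks to the end, B appends s[prev:]
      have hno : ∀ q, i ≤ q → ¬ T <+: L.drop q := by
        intro q hq hpre
        by_cases hqn : q ≤ L.length
        · exact (PySem.Chars.findFrom_natCast_eq_neg_one_iff L T i hin).mp hfind
            (pvPrefix_infix L T i q hq hpre)
        · have : L.drop q = [] := List.drop_eq_nil_of_le (by omega)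
          rw [this] at hpre
          exact hT (List.prefix_nil.mp hpre)
      simp only [pvLoopB, hfind, if_true]
      rw [pvLoopA_skip L T R hT (L.length - i) i L.length
            (parts ++ (L.drop prev).take (i - prev)) hin le_rfl le_rfl
            (fun q hq _ => hno q hq) f1 1 h1 (by omega)]
      simp only [pvLoopA, lt_irrefl, if_false]
      rw [List.append_assoc, pvGlue L prev i L.length hpi hin]
      have : L.length - prev = (L.drop prev).length := by simp
      rw [this, List.take_length]
    · -- an occurrence at pn = findFrom: A walks there, both test the same boundaries
      obtain ⟨hle, hpre, hmin⟩ := PySem.Chars.findFrom_natCast_spec L T i hin hfind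
      set pI : Int := PySem.Chars.findFrom L T (i : Int) with hpI
      set pn : Nat := pI.toNat with hpn
      have hipn : i ≤ pn := by omega
      have hT1 : 1 ≤ T.length := by
        cases T with
        | nil => exact absurd rfl hT
        | cons a l => simp
      have hpnn : pn + T.length ≤ L.length := by
        by_cases h : pn ≤ L.length
        · have := hpre.length_le
          simp at this
          omega
        · exfalso
          have : L.drop pn = [] := List.drop_eq_nil_of_le (by omega)
          rw [this] at hpre
          exact hT (List.prefix_nil.mp hpre)
      have hpnlt : pn < L.length := by omega
      -- A walks from i to pn
      rw [pvLoopA_skip L T R hT (L.length - i) i pn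
            (parts ++ (L.drop prev).take (i - prev)) hipn (by omega) (by omega)
            (fun q hq hq' => hmin q hq hq') f1 (L.length - pn + 1) h1 (by omega)]
      rw [List.append_assoc, pvGlue L prev i pn hpi hipn]
      -- unfold one step of A at pn and one step of B
      have hmatch : (L.drop pn).take T.length = T := (pvMatch_iff L T pn).mpr hpre
      simp only [pvLoopA, pvLoopB, if_pos hpnlt, if_pos hmatch]
      simp only [pvIsAlnumA_eq_pvIsWordB, ← hpI, ← hpn]
      split
      · -- boundary ok: both append repl and continue at pn + tlen
        have := ih (pn + T.length) (pn + T.length)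
          (parts ++ (L.drop prev).take (pn - prev) ++ R) (by omega) le_rfl hpnn
          (L.length - pn) f2' (by omega) (by omega)
        simpa using this
      · -- boundary not ok: A appends s[pn], B retries from pn + 1
        have harg : (L.drop prev).take (pn + 1 - prev) =
            (L.drop prev).take (pn - prev) ++ [L.getD pn ' '] := by
          rw [show pn + 1 - prev = (pn - prev) + 1 by omega, List.take_add_one]
          congr 1
          rw [List.getElem?_drop, show prev + (pn - prev) = pn by omega,
              List.getElem?_eq_getElem hpnlt, List.getD_eq_getElem L ' ' hpnlt]
          rfl
        have := ih (pn + 1) prev parts (by omega) (by omega) (by omega)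
          (L.length - pn) f2' (by omega) (by omega)
        rw [harg, ← List.append_assoc] at this
        exact this

-- ===== VERDICT (by name: the statement is the Claim_ definition above) =====
theorem replace_const_token_py_spec : Claim_equal_replace_const_token_py := by
  intro s token repl _hDom hPre
  unfold Spec_replace_const_token_py replace_const_token_py replace_const_token_py_alt
  have hT : token.toList ≠ [] := fun h => hPre (String.toList_eq_nil_iff.mp h)
  congr 1
  have := pvBridge s.toList token.toList repl.toList hT s.toList.length 0 0 []
    (by omega) le_rfl (by omega) (s.toList.length + 1) (s.toList.length + 2)
    (by omega) (by omega)
  simpa using this
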